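-- pv_equiv track=rewrite | github.com/minseokpark6/Problem_Solving | 프로그래머스/1/131128. 숫자 짝꿍/숫자 짝꿍.py | solution
-- ===== SOURCE A (Python) =====
-- from collections import Counter
--
-- def solution(X, Y):
--     # X, Y에 들어가 있는 숫자 및 횟수 딕셔너리에 저장
--     y = dict(Counter(Y))
--
--     # 공통된 수 확인
--     result = []
--     for i in X:
--         if (i in y) and (y[i] > 0):
--             y[i] -= 1
--             result.append(i)
--
--     # 가장 큰수로 반환
--     result.sort(reverse = True)
--
--     # 출력
--     # 공통 수가 없는 경우 / 0으로만 이루어져 있는 경우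
--     if not result:
--         return "-1"
--     elif all(x == "0" for x in result):
--         return "0"
--
--     # 그 외의 경우
--     return "".join(result)
-- ===== SOURCE B (Python) =====
-- from collections import Counter
--
-- def solution(X, Y):
--     cx, cy = Counter(X), Counter(Y)
--     out = "".join(c * min(cx[c], cy[c]) for c in sorted(cx.keys() & cy.keys(), reverse=True))
--     if not out:
--         return "-1"
--     if all(c == "0" for c in out):
--         return "0"
--     return out
-- ===== Notes on version B (the rewrite author's own statement) =====
-- stated objective: simpler
-- what changed: Replaces the greedy consume-pass over X (decrementing Y's counter and appending matches) followed by sorting the collected list with two frequency tables intersected on their key sets: the common characters are sorted descending once and each is emitted min(countX,countY) times, so the result is produced already in order with no per-character consume loop and no sort of the full result.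
import Mathlib
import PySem

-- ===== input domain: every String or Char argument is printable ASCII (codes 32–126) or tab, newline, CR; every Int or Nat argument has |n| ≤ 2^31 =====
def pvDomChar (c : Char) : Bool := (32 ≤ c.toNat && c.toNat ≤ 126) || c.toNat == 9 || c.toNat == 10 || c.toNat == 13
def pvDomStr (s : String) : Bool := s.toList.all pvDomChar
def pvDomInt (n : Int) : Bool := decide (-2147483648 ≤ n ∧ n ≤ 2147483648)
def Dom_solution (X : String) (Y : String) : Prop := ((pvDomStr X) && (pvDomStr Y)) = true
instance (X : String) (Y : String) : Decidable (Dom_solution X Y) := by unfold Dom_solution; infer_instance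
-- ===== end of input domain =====

-- B replaces A's greedy consume-pass over X (plus a sort of the whole collected result) by two
-- frequency tables whose common keys are sorted descending once and emitted min-count times (simpler).

-- ===== PORT A =====
-- the body of A's 'for i in X' loop: state = (the dict y, the result list)
def solAStep (st : PySem.Dict Char Int × List Char) (i : Char) : PySem.Dict Char Int × List Char :=
  if st.1.contains i && decide ((0:Int) < st.1.getD i 0) then
    (st.1.insert i (st.1.getD i 0 - 1), st.2 ++ [i])
  else st

def solution (X : String) (Y : String) : String :=
  let y := PySem.Dict.counter Y.toList
  let r := X.toList.foldl solAStep (y, ([] : List Char))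
  let result := PySem.List.sorted r.2 (fun c => c) true
  if result = [] then "-1"
  else if result.all (fun x => x == '0') then "0"
  else String.ofList result

-- ===== PORT B =====
-- 'c * min(cx[c], cy[c])' for one common character c
def solBEmit (cx cy : PySem.Dict Char Int) (c : Char) : List Char :=
  PySem.List.pyRepeat [c] (min (cx.getD c 0) (cy.getD c 0))

def solution_alt (X : String) (Y : String) : String :=
  let cx := PySem.Dict.counter X.toList
  let cy := PySem.Dict.counter Y.toList
  let common := PySem.List.sorted (PySem.Set.inter (PySem.Set.ofList cx.keys) cy.keys) (fun c => c) true
  let out := common.flatMap (solBEmit cx cy)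
  if out = [] then "-1"
  else if out.all (fun c => c == '0') then "0"
  else String.ofList out

-- ===== PRECONDITION & SPEC =====
def Spec_solution (X : String) (Y : String) (out : String) : Prop := out = solution_alt X Y
instance (X : String) (Y : String) (out : String) : Decidable (Spec_solution X Y out) := by unfold Spec_solution; infer_instance

-- ===== CLAIM (what is proved, stated in full; the proofs are below) =====
def Claim_equal_solution : Prop := ∀ (X : String) (Y : String), Dom_solution X Y → Spec_solution X Y (solution X Y)

-- ===== LEMMAS AND PROOFS =====

-- A's greedy loop: each character ends up in the result min(count in X-part, current dict value) times
theorem solA_loop_count (xs : List Char) (d : PySem.Dict Char Int) (res : List Char)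
    (H : ∀ k, 0 ≤ d.getD k 0) (c : Char) :
    ((xs.foldl solAStep (d, res)).2).count c
      = res.count c + min (xs.count c) (d.getD c 0).toNat := by
  induction xs generalizing d res with
  | nil => simp
  | cons x t ih =>
    by_cases hx : (0:Int) < d.getD x 0
    · have hcont : d.contains x = true := by
        by_contra hc
        have := PySem.Dict.getD_of_not_contains (d := d) (k := x) (d0 := (0:Int)) (by simpa using hc)
        omega
      have hstep : solAStep (d, res) x = (d.insert x (d.getD x 0 - 1), res ++ [x]) := by
        simp [solAStep, hcont, hx]
      rw [List.foldl_cons, hstep, ih _ _ ?_]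
      · by_cases hcx : c = x
        · subst hcx
          simp
          omega
        · have hxc : ¬ x = c := fun h => hcx h.symm
          simp [PySem.Dict.getD_insert, hcx, hxc, List.count_append]
      · intro k
        by_cases hk : k = x
        · subst hk; simp; omega
        · simp [PySem.Dict.getD_insert, hk]; exact H k
    · have hstep : solAStep (d, res) x = (d, res) := by
        simp [solAStep, hx]
      rw [List.foldl_cons, hstep, ih _ _ H]
      by_cases hcx : c = x
      · subst hcx
        have : d.getD c 0 = 0 := le_antisymm (by omega) (H c)
        simp [this]
      · have hxc : ¬ x = c := fun h => hcx h.symm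
        simp [hxc]

-- counting inside a flatMap of replicate-blocks over a Nodup list
theorem count_flatMap_replicate (s : List Char) (hs : s.Nodup) (n : Char → Nat) (c : Char) :
    (s.flatMap (fun x => List.replicate (n x) x)).count c = if c ∈ s then n c else 0 := by
  induction s with
  | nil => simp
  | cons x t ih =>
    rcases List.nodup_cons.mp hs with ⟨hx, ht⟩
    rw [List.flatMap_cons, List.count_append, ih ht]
    by_cases hcx : c = x
    · subst hcx
      simp [hx]
    · have hxc : ¬ x = c := fun h => hcx h.symm
      simp [List.count_replicate, hcx, hxc]

-- a flatMap of replicate-blocks over a strictly descending list is (weakly) descending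
theorem pairwise_flatMap_replicate (s : List Char) (hp : s.Pairwise (fun a b => b < a))
    (n : Char → Nat) :
    (s.flatMap (fun x => List.replicate (n x) x)).Pairwise (fun a b => b ≤ a) := by
  induction s with
  | nil => simp
  | cons x t ih =>
    rcases List.pairwise_cons.mp hp with ⟨hx, ht⟩
    rw [List.flatMap_cons]
    apply List.pairwise_append.mpr
    refine ⟨?_, ih ht, ?_⟩
    · exact List.pairwise_replicate.mpr (Or.inr le_rfl)
    · intro a ha b hb
      have ha' : a = x := (List.eq_of_mem_replicate ha)
      rcases List.mem_flatMap.mp hb with ⟨y, hy, hby⟩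
      have hb' : b = y := List.eq_of_mem_replicate hby
      subst ha'; subst hb'
      exact le_of_lt (hx _ hy)

-- core: A's collected-then-sorted list IS B's table-driven descending emission
theorem main_eq (X Y : String) :
    PySem.List.sorted ((X.toList.foldl solAStep (PySem.Dict.counter Y.toList, ([] : List Char))).2) (fun c => c) true
      = (PySem.List.sorted (PySem.Set.inter (PySem.Set.ofList (PySem.Dict.counter X.toList).keys) (PySem.Dict.counter Y.toList).keys) (fun c => c) true).flatMap
          (solBEmit (PySem.Dict.counter X.toList) (PySem.Dict.counter Y.toList)) := by
  set xs := X.toList with hxs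
  set ys := Y.toList with hys
  set n : Char → Nat := fun c => min (xs.count c) (ys.count c) with hn
  set common := PySem.List.sorted (PySem.Set.inter (PySem.Set.ofList (PySem.Dict.counter xs).keys) (PySem.Dict.counter ys).keys) (fun c => c) true with hcommon
  -- B's blocks are replicate-blocks of n
  have hemit : solBEmit (PySem.Dict.counter xs) (PySem.Dict.counter ys) = fun c => List.replicate (n c) c := by
    funext c
    simp only [solBEmit, PySem.List.pyRepeat_singleton, PySem.Dict.getD_counter, hn]
    congr 1
    omega
  rw [hemit]
  -- membership and nodup of common
  have hinter_nodup : (PySem.Set.inter (PySem.Set.ofList (PySem.Dict.counter xs).keys) (PySem.Dict.counter ys).keys).Nodup :=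
    PySem.Set.nodup_inter _ _ (PySem.Set.nodup_ofList _)
  have hnodup : common.Nodup :=
    ((PySem.List.sorted_perm _ _ _).nodup_iff).mpr hinter_nodup
  have hmem : ∀ c, c ∈ common ↔ (c ∈ xs ∧ c ∈ ys) := by
    intro c
    rw [hcommon, PySem.List.mem_sorted, PySem.Set.mem_inter _ _ c, PySem.Set.mem_ofList,
        PySem.Dict.keys_counter, PySem.Dict.keys_counter, PySem.Set.mem_ofList, PySem.Set.mem_ofList]
  -- counts agree everywhere
  have hcountB : ∀ c, (common.flatMap (fun c => List.replicate (n c) c)).count c = n c := by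
    intro c
    rw [count_flatMap_replicate _ hnodup]
    by_cases h : c ∈ common
    · simp [h]
    · rw [if_neg h]
      rcases (not_and_or.mp ((hmem c).not.mp h)) with h' | h' <;>
        simp [hn, List.count_eq_zero_of_not_mem h']
  have hcountA : ∀ c, ((xs.foldl solAStep (PySem.Dict.counter ys, ([] : List Char))).2).count c = n c := by
    intro c
    rw [solA_loop_count _ _ _ (fun k => by simp [PySem.Dict.getD_counter]) c]
    simp [PySem.Dict.getD_counter, hn]
  -- permutation
  have hperm : ((xs.foldl solAStep (PySem.Dict.counter ys, ([] : List Char))).2).Perm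
      (common.flatMap (fun c => List.replicate (n c) c)) := by
    rw [List.perm_iff_count]
    intro c; rw [hcountA c, hcountB c]
  -- both sides sorted descending
  have hpair_common : common.Pairwise (fun a b => b < a) := by
    have h1 : common.Pairwise (fun a b => b ≤ a) := by
      have := PySem.List.sorted_pairwise_rev (xs := PySem.Set.inter (PySem.Set.ofList (PySem.Dict.counter xs).keys) (PySem.Dict.counter ys).keys) (key := fun c => c)
      simpa [hcommon] using this
    exact (h1.and hnodup).imp (fun {a b} h => lt_of_le_of_ne h.1 (Ne.symm h.2))
  have hpairB : (common.flatMap (fun c => List.replicate (n c) c)).Pairwise (fun a b => b ≤ a) :=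
    pairwise_flatMap_replicate _ hpair_common n
  -- conclude: both are the same multiset arranged descending
  apply PySem.List.eq_of_perm_of_pairwise_le_of_injective (key := fun c : Char => -(c.toNat : Int))
  · intro a b h
    simp only [neg_inj, Int.natCast_inj] at h
    exact Char.ext (UInt32.toNat_inj.mp h)
  · exact ((PySem.List.sorted_perm _ _ _).trans hperm)
  · have h1 : (PySem.List.sorted ((xs.foldl solAStep (PySem.Dict.counter ys, ([] : List Char))).2) (fun c => c) true).Pairwise (fun a b => b ≤ a) := by
      have := PySem.List.sorted_pairwise_rev (xs := (xs.foldl solAStep (PySem.Dict.counter ys, ([] : List Char))).2) (key := fun c : Char => c)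
      simpa using this
    exact h1.imp (fun {a b} (h : b ≤ a) => by simpa using neg_le_neg (Int.ofNat_le.mpr (h : b.toNat ≤ a.toNat)))
  · exact hpairB.imp (fun {a b} (h : b ≤ a) => by simpa using neg_le_neg (Int.ofNat_le.mpr (h : b.toNat ≤ a.toNat)))

-- ===== VERDICT (by name: the statement is the Claim_ definition above) =====
theorem solution_spec : Claim_equal_solution := by
  intro X Y _
  unfold Spec_solution
  simp only [solution, solution_alt]
  rw [main_eq X Y]
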